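-- pv_equiv track=rewrite | github.com/autumnalEqvinox/DeQuirker | DeQuirk.py | DeQuirkify_Dismas
-- ===== SOURCE A (Python) =====
-- def DeQuirkify_Dismas(line):
--     if(line[:6] == "DISMAS"):
--         line = line.replace(line[:8], '')
--         actual_name = True
--     else:
--         line = line.replace(line[:4], '')
--         actual_name = False
--     line = line[:-4]
--     line = list(line)
--     line.append('')
--     line.append('')
--     i = 0
--     for c in line:
--         if (line[i-1] + line[i] == "/\\"):
--                 line[i-1] = "a"
--                 line[i] = ''
--         elif ((line[i-1] + line[i] == "\\/")):
--                 line[i-1] = "v"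
--                 line[i] = ''
--         i+=1
--     line = ''.join(line)
--     if(actual_name):
--         line = "DISMAS: " + line
--     else:
--         line = "GD: " + line
--     return line
-- ===== SOURCE B (Python) =====
-- def DeQuirkify_Dismas(line):
--     if line[:6] == "DISMAS":
--         body = line.replace(line[:8], '')
--         prefix = "DISMAS: "
--     else:
--         body = line.replace(line[:4], '')
--         prefix = "GD: "
--     body = body[:-4]
--     out = []
--     i = 0
--     n = len(body)
--     while i < n:
--         pair = body[i:i+2]
--         if pair == '/\\':
--             out.append('a')
--             i += 2
--         elif pair == '\\/':
--             out.append('v')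
--             i += 2
--         else:
--             out.append(body[i])
--             i += 1
--     return prefix + ''.join(out)
-- ===== Notes on version B (the rewrite author's own statement) =====
-- stated objective: simpler
-- what changed: The in-place list-mutation loop over all indices (with appended '' sentinels and a negative-index wrap-around read) is replaced by a single forward scan that consumes an arrow pair ('/\' -> 'a', '\/' -> 'v') or one character per step while building the output list; the prefix/suffix stripping is kept byte-for-byte.
import Mathlib
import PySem

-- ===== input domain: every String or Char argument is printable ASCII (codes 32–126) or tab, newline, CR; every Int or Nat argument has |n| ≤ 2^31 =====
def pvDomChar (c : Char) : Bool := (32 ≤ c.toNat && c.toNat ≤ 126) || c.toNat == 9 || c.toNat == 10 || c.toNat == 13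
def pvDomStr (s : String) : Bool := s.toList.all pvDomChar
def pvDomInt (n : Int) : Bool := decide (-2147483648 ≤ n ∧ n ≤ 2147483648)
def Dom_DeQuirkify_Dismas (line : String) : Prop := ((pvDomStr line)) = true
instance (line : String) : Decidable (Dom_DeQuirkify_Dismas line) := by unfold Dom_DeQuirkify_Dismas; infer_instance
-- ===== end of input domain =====

-- B replaces A's in-place index loop (with its negative-index wrap and appended sentinels) by a
-- single forward scan that consumes arrow pairs and builds the output; objective: simpler.

-- ===== PORT A =====
-- Python list cells hold strings '', one char, 'a', 'v'; each cell is ported as a List Char.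
-- One step of A's for-loop at index i (line[i-1] read/written with Python negative-index semantics).
def pvAStep (acc : List (List Char)) (i : Nat) : List (List Char) :=
  let a := PySem.List.pyGetD acc ((i : Int) - 1) []
  let b := PySem.List.pyGetD acc (i : Int) []
  if a ++ b = ['/', '\\'] then
    PySem.List.pySetD (PySem.List.pySetD acc ((i : Int) - 1) ['a']) (i : Int) []
  else if a ++ b = ['\\', '/'] then
    PySem.List.pySetD (PySem.List.pySetD acc ((i : Int) - 1) ['v']) (i : Int) []
  else acc

def DeQuirkify_Dismas (line : String) : String :=
  let ls := line.toList
  let (ls, actualName) :=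
    if PySem.List.slice ls none (some 6) = "DISMAS".toList then
      (PySem.Chars.replace ls (PySem.List.slice ls none (some 8)) [], true)
    else
      (PySem.Chars.replace ls (PySem.List.slice ls none (some 4)) [], false)
  let ls := PySem.List.slice ls none (some (-4))
  let cells := ls.map (fun c => [c]) ++ [[], []]
  let cells := (List.range cells.length).foldl pvAStep cells
  let out := cells.flatten
  if actualName then String.ofList ("DISMAS: ".toList ++ out)
  else String.ofList ("GD: ".toList ++ out)

-- ===== PORT B =====
-- Source B's while loop: look at the two-char window, consume 2 on an arrow pair, else 1.
def pvScanArrows : List Char → List Char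
  | [] => []
  | [c] => [c]
  | c :: d :: rest =>
    if c = '/' ∧ d = '\\' then 'a' :: pvScanArrows rest
    else if c = '\\' ∧ d = '/' then 'v' :: pvScanArrows rest
    else c :: pvScanArrows (d :: rest)
termination_by xs => xs.length

def DeQuirkify_Dismas_alt (line : String) : String :=
  let ls := line.toList
  let (body, prefixChars) :=
    if PySem.List.slice ls none (some 6) = "DISMAS".toList then
      (PySem.Chars.replace ls (PySem.List.slice ls none (some 8)) [], "DISMAS: ".toList)
    else
      (PySem.Chars.replace ls (PySem.List.slice ls none (some 4)) [], "GD: ".toList)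
  let body := PySem.List.slice body none (some (-4))
  String.ofList (prefixChars ++ pvScanArrows body)

-- ===== PRECONDITION & SPEC =====
def Spec_DeQuirkify_Dismas (line : String) (out : String) : Prop := out = DeQuirkify_Dismas_alt line
instance (line : String) (out : String) : Decidable (Spec_DeQuirkify_Dismas line out) := by unfold Spec_DeQuirkify_Dismas; infer_instance

-- ===== CLAIM (what is proved, stated in full; the proofs are below) =====
def Claim_equal_DeQuirkify_Dismas : Prop := ∀ (line : String), Dom_DeQuirkify_Dismas line → Spec_DeQuirkify_Dismas line (DeQuirkify_Dismas line)

-- ===== LEMMAS AND PROOFS =====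

-- Pure recursion computing the final cell list of A's loop from position of `prev` onwards.
def pvRun (prev : List Char) : List (List Char) → List (List Char)
  | [] => [prev]
  | c :: cs =>
    if prev ++ c = ['/', '\\'] then ['a'] :: pvRun [] cs
    else if prev ++ c = ['\\', '/'] then ['v'] :: pvRun [] cs
    else prev :: pvRun c cs

-- Setting position |pre| of pre ++ x :: ys.
theorem pvSetAt {α : Type} (pre : List α) (x : α) (ys : List α) (v : α) :
    (pre ++ x :: ys).set pre.length v = pre ++ v :: ys := by
  induction pre with
  | nil => rfl
  | cons h t ih => simp [ih]

-- The fold over indices [|pre|+1, |pre|+1+|cs|) rewrites pre ++ prev :: cs to pre ++ pvRun prev cs.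
theorem pvFold_eq_run (cs : List (List Char)) (prev : List Char) (pre : List (List Char)) :
    (List.range' (pre.length + 1) cs.length).foldl pvAStep (pre ++ prev :: cs)
      = pre ++ pvRun prev cs := by
  induction cs generalizing prev pre with
  | nil => simp [pvRun]
  | cons c rest ih =>
    simp only [List.length_cons]
    rw [List.range'_succ, List.foldl_cons]
    have hstep : pvAStep (pre ++ prev :: c :: rest) (pre.length + 1)
        = pre ++ (if prev ++ c = ['/', '\\'] then ['a'] :: [] :: rest
                  else if prev ++ c = ['\\', '/'] then ['v'] :: [] :: rest
                  else prev :: c :: rest) := by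
      unfold pvAStep
      have e1 : (Nat.cast (pre.length + 1) : Int) - 1 = (Nat.cast pre.length : Int) := by
        push_cast; ring
      have ha : PySem.List.pyGetD (pre ++ prev :: c :: rest) (Nat.cast pre.length : Int) [] = prev := by
        simp [List.getD_eq_getElem?_getD]
      have hb : PySem.List.pyGetD (pre ++ prev :: c :: rest) (Nat.cast (pre.length + 1) : Int) [] = c := by
        rw [show pre ++ prev :: c :: rest = (pre ++ [prev]) ++ c :: rest by simp,
            show (Nat.cast (pre.length + 1) : Int) = (Nat.cast (pre ++ [prev]).length : Int) by simp,
            PySem.List.pyGetD_natCast]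
        simp [List.getD_eq_getElem?_getD]
      simp only [e1, ha, hb]
      split_ifs with hpa hpv
      · rw [PySem.List.pySetD_natCast, PySem.List.pySetD_natCast, pvSetAt,
            show pre ++ (['a'] : List Char) :: c :: rest = (pre ++ [['a']]) ++ c :: rest by simp,
            show pre.length + 1 = (pre ++ [(['a'] : List Char)]).length by simp, pvSetAt]
        simp
      · rw [PySem.List.pySetD_natCast, PySem.List.pySetD_natCast, pvSetAt,
            show pre ++ (['v'] : List Char) :: c :: rest = (pre ++ [['v']]) ++ c :: rest by simp,
            show pre.length + 1 = (pre ++ [(['v'] : List Char)]).length by simp, pvSetAt]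
        simp
      · rfl
    rw [hstep]
    simp only [pvRun]
    split_ifs with hpa hpv
    · rw [show pre ++ (['a'] : List Char) :: ([] : List Char) :: rest = (pre ++ [['a']]) ++ [] :: rest by simp,
          show pre.length + 1 + 1 = (pre ++ [(['a'] : List Char)]).length + 1 by simp,
          ih [] (pre ++ [['a']])]
      simp
    · rw [show pre ++ (['v'] : List Char) :: ([] : List Char) :: rest = (pre ++ [['v']]) ++ [] :: rest by simp,
          show pre.length + 1 + 1 = (pre ++ [(['v'] : List Char)]).length + 1 by simp,
          ih [] (pre ++ [['v']])]
      simp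
    · rw [show pre ++ prev :: c :: rest = (pre ++ [prev]) ++ c :: rest by simp,
          show pre.length + 1 + 1 = (pre ++ [prev]).length + 1 by simp,
          ih c (pre ++ [prev])]
      simp

-- A helper: the fold starting at index 1 over prev :: cs.
theorem pvFold_atOne (prev : List Char) (cs : List (List Char)) :
    (List.range' 1 cs.length).foldl pvAStep (prev :: cs) = pvRun prev cs := by
  simpa using pvFold_eq_run cs prev []

-- Step 0 never fires: line[-1] is an appended '' and ''+line[0] has length ≤ 1.
theorem pvAStep_zero (body : List Char) :
    pvAStep (body.map (fun c => [c]) ++ [[], []]) 0 = body.map (fun c => [c]) ++ [[], []] := by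
  cases body with
  | nil => decide
  | cons c cs =>
    unfold pvAStep
    have hlast : PySem.List.pyGetD (List.map (fun c => [c]) (c :: cs) ++ [[], []]) ((0 : Nat) - 1 : Int) [] = [] := by
      have h : List.map (fun c => ([c] : List Char)) (c :: cs) ++ [[], []]
          = (List.map (fun c => ([c] : List Char)) (c :: cs) ++ [[]]) ++ [[]] := by simp
      rw [h, show ((0 : Nat) - 1 : Int) = -1 by norm_num, PySem.List.pyGetD_neg_one_append_singleton]
    have hhead : PySem.List.pyGetD (List.map (fun c => [c]) (c :: cs) ++ [[], []]) ((0 : Nat) : Int) [] = [c] := by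
      simp [PySem.List.pyGetD_zero_cons]
    rw [hlast, hhead]
    simp

-- Joint flatten lemma: A's pure loop result, flattened, is B's forward scan.
theorem pvRun_flatten (cs : List Char) :
    (pvRun [] (cs.map (fun c => [c]) ++ [[], []])).flatten = pvScanArrows cs ∧
    ∀ c, (pvRun [c] (cs.map (fun c => [c]) ++ [[], []])).flatten = pvScanArrows (c :: cs) := by
  induction cs with
  | nil =>
    constructor
    · simp [pvRun, pvScanArrows]
    · intro c; simp [pvRun, pvScanArrows]
  | cons d rest ih =>
    constructor
    · simp only [List.map_cons, List.cons_append]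
      rw [pvRun]
      rw [if_neg (by simp), if_neg (by simp)]
      rw [List.flatten_cons, ih.2 d]
      simp
    · intro c
      simp only [List.map_cons, List.cons_append]
      rw [pvRun]
      by_cases hpa : c = '/' ∧ d = '\\'
      · rw [if_pos (by simp [hpa.1, hpa.2])]
        rw [List.flatten_cons, ih.1]
        rw [hpa.1, hpa.2, pvScanArrows]
        simp
      · by_cases hpv : c = '\\' ∧ d = '/'
        · rw [if_neg (by intro h; exact hpa ⟨by injection h, by injection h with _ h2; injection h2⟩),
              if_pos (by simp [hpv.1, hpv.2])]
          rw [List.flatten_cons, ih.1]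
          rw [hpv.1, hpv.2, pvScanArrows]
          simp
        · rw [if_neg (by intro h; exact hpa ⟨by injection h, by injection h with _ h2; injection h2⟩),
              if_neg (by intro h; exact hpv ⟨by injection h, by injection h with _ h2; injection h2⟩)]
          rw [List.flatten_cons, ih.2 d]
          rw [pvScanArrows]
          rw [if_neg hpa, if_neg hpv]
          simp

theorem pvLoop_eq_scan (body : List Char) :
    ((List.range (body.map (fun c => [c]) ++ [[], []]).length).foldl pvAStep
      (body.map (fun c => [c]) ++ [[], []])).flatten = pvScanArrows body := by
  cases body with
  | nil =>
    simp only [pvScanArrows]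
    decide
  | cons c cs =>
    simp only [List.map_cons, List.cons_append, List.length_cons]
    rw [List.range_eq_range', List.range'_succ, List.foldl_cons]
    have hz := pvAStep_zero (c :: cs)
    simp only [List.map_cons, List.cons_append] at hz
    rw [hz, show (0 + 1 : Nat) = 1 from rfl, pvFold_atOne]
    exact (pvRun_flatten cs).2 c

-- ===== VERDICT (by name: the statement is the Claim_ definition above) =====
theorem DeQuirkify_Dismas_spec : Claim_equal_DeQuirkify_Dismas := by
  intro line _
  unfold Spec_DeQuirkify_Dismas DeQuirkify_Dismas DeQuirkify_Dismas_alt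
  by_cases h : PySem.List.slice line.toList none (some 6) = "DISMAS".toList <;>
    simp only [h, if_pos, if_neg, not_false_iff] <;>
    rw [pvLoop_eq_scan] <;> simp
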